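-- pv_equiv track=rewrite | github.com/robencr8/mashaaer-core | test_mixed_emotions.py | _emotions_are_equivalent
-- ===== SOURCE A (Python) =====
-- def _emotions_are_equivalent(emotion1: str, emotion2: str) -> bool:
--     """Check if two emotions are semantically equivalent or closely related
--
--     Args:
--         emotion1: First emotion name
--         emotion2: Second emotion name
--
--     Returns:
--         True if emotions are equivalent or closely related
--     """
--     # Define groups of equivalent emotions
--     equivalent_groups = [
--         {"happy", "excited", "joy", "joyful"},
--         {"sad", "disappointed", "melancholy"},
--         {"fearful", "scared", "afraid", "anxious", "nervous"},
--         {"angry", "frustrated", "mad", "annoyed"},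
--         {"surprised", "shocked", "astonished", "amazed"},
--         {"disgusted", "repulsed"},
--         {"calm", "relaxed", "peaceful", "serene"},
--         {"proud", "accomplished", "confident"},
--         {"grateful", "thankful", "appreciative"},
--         {"inspired", "motivated", "determined", "hopeful"},
--         {"confused", "uncertain", "unsure", "puzzled"},
--         {"embarrassed", "humiliated", "ashamed"},
--         {"bored", "disinterested", "uninterested"},
--         {"tired", "exhausted", "fatigued"},
--         {"satisfied", "content", "fulfilled"},
--         {"lonely", "isolated", "abandoned"}
--     ]
--
--     # Check if emotions are in the same group
--     for group in equivalent_groups: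
--         if emotion1 in group and emotion2 in group:
--             return True
--
--     # Also check exact match
--     return emotion1 == emotion2
-- ===== SOURCE B (Python) =====
-- # B: hand-written lookup table (emotion -> group id); each call is an equality test plus two dict lookups.
-- _GROUP_ID = {
--     "happy": 0, "excited": 0, "joy": 0, "joyful": 0,
--     "sad": 1, "disappointed": 1, "melancholy": 1,
--     "fearful": 2, "scared": 2, "afraid": 2, "anxious": 2, "nervous": 2,
--     "angry": 3, "frustrated": 3, "mad": 3, "annoyed": 3,
--     "surprised": 4, "shocked": 4, "astonished": 4, "amazed": 4,
--     "disgusted": 5, "repulsed": 5,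
--     "calm": 6, "relaxed": 6, "peaceful": 6, "serene": 6,
--     "proud": 7, "accomplished": 7, "confident": 7,
--     "grateful": 8, "thankful": 8, "appreciative": 8,
--     "inspired": 9, "motivated": 9, "determined": 9, "hopeful": 9,
--     "confused": 10, "uncertain": 10, "unsure": 10, "puzzled": 10,
--     "embarrassed": 11, "humiliated": 11, "ashamed": 11,
--     "bored": 12, "disinterested": 12, "uninterested": 12,
--     "tired": 13, "exhausted": 13, "fatigued": 13,
--     "satisfied": 14, "content": 14, "fulfilled": 14,
--     "lonely": 15, "isolated": 15, "abandoned": 15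
-- }
--
--
-- def _emotions_are_equivalent(emotion1: str, emotion2: str) -> bool:
--     if emotion1 == emotion2:
--         return True
--     g1 = _GROUP_ID.get(emotion1)
--     return g1 is not None and _GROUP_ID.get(emotion2) == g1
-- ===== Notes on version B (the rewrite author's own statement) =====
-- stated objective: alternative
-- what changed: Replaces the per-call group-by-group membership scan with a hand-written lookup table (emotion -> group id) consulted by two direct dict lookups after an equality guard.
import Mathlib
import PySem

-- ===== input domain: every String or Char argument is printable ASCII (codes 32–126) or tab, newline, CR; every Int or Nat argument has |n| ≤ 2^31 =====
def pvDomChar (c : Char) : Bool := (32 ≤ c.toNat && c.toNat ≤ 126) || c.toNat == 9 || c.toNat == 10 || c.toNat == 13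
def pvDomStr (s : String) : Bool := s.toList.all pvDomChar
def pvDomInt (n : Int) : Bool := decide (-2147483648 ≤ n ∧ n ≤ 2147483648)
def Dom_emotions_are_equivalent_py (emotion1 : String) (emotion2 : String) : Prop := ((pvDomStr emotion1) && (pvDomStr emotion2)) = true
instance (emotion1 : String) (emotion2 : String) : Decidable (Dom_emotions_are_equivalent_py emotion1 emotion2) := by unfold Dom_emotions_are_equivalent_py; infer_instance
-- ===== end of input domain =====

-- B replaces A's per-call scan over all groups by a hand-written lookup table (emotion -> group id) and two direct lookups.

-- ===== PORT A =====
-- the literal list of equivalent_groups (Python set literals -> PySem.Set.ofList)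
def pyEquivalentGroups : List (PySem.Set String) :=
  [PySem.Set.ofList ["happy", "excited", "joy", "joyful"],
   PySem.Set.ofList ["sad", "disappointed", "melancholy"],
   PySem.Set.ofList ["fearful", "scared", "afraid", "anxious", "nervous"],
   PySem.Set.ofList ["angry", "frustrated", "mad", "annoyed"],
   PySem.Set.ofList ["surprised", "shocked", "astonished", "amazed"],
   PySem.Set.ofList ["disgusted", "repulsed"],
   PySem.Set.ofList ["calm", "relaxed", "peaceful", "serene"],
   PySem.Set.ofList ["proud", "accomplished", "confident"],
   PySem.Set.ofList ["grateful", "thankful", "appreciative"],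
   PySem.Set.ofList ["inspired", "motivated", "determined", "hopeful"],
   PySem.Set.ofList ["confused", "uncertain", "unsure", "puzzled"],
   PySem.Set.ofList ["embarrassed", "humiliated", "ashamed"],
   PySem.Set.ofList ["bored", "disinterested", "uninterested"],
   PySem.Set.ofList ["tired", "exhausted", "fatigued"],
   PySem.Set.ofList ["satisfied", "content", "fulfilled"],
   PySem.Set.ofList ["lonely", "isolated", "abandoned"]]

-- the 'for group in equivalent_groups: if … return True' loop; falls through to 'return emotion1 == emotion2'
def pyGroupLoop : List (PySem.Set String) → String → String → Bool
  | [], e1, e2 => e1 == e2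
  | g :: gs, e1, e2 =>
      if PySem.Set.contains g e1 && PySem.Set.contains g e2 then true
      else pyGroupLoop gs e1 e2

def emotions_are_equivalent_py (emotion1 : String) (emotion2 : String) : Bool :=
  pyGroupLoop pyEquivalentGroups emotion1 emotion2

-- ===== PORT B =====
-- _GROUP_ID: the hand-written dict literal from Source B
def altGroupId : PySem.Dict String Int :=
  PySem.Dict.ofList
  [("happy", 0), ("excited", 0), ("joy", 0), ("joyful", 0),
   ("sad", 1), ("disappointed", 1), ("melancholy", 1),
   ("fearful", 2), ("scared", 2), ("afraid", 2), ("anxious", 2), ("nervous", 2),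
   ("angry", 3), ("frustrated", 3), ("mad", 3), ("annoyed", 3),
   ("surprised", 4), ("shocked", 4), ("astonished", 4), ("amazed", 4),
   ("disgusted", 5), ("repulsed", 5),
   ("calm", 6), ("relaxed", 6), ("peaceful", 6), ("serene", 6),
   ("proud", 7), ("accomplished", 7), ("confident", 7),
   ("grateful", 8), ("thankful", 8), ("appreciative", 8),
   ("inspired", 9), ("motivated", 9), ("determined", 9), ("hopeful", 9),
   ("confused", 10), ("uncertain", 10), ("unsure", 10), ("puzzled", 10),
   ("embarrassed", 11), ("humiliated", 11), ("ashamed", 11),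
   ("bored", 12), ("disinterested", 12), ("uninterested", 12),
   ("tired", 13), ("exhausted", 13), ("fatigued", 13),
   ("satisfied", 14), ("content", 14), ("fulfilled", 14),
   ("lonely", 15), ("isolated", 15), ("abandoned", 15)]

def emotions_are_equivalent_py_alt (emotion1 : String) (emotion2 : String) : Bool :=
  if emotion1 == emotion2 then true
  else
    match altGroupId.get? emotion1 with
    | none => false
    | some g1 => altGroupId.get? emotion2 == some g1

-- ===== PRECONDITION & SPEC =====
def Spec_emotions_are_equivalent_py (emotion1 : String) (emotion2 : String) (out : Bool) : Prop := out = emotions_are_equivalent_py_alt emotion1 emotion2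
instance (emotion1 : String) (emotion2 : String) (out : Bool) : Decidable (Spec_emotions_are_equivalent_py emotion1 emotion2 out) := by unfold Spec_emotions_are_equivalent_py; infer_instance

-- ===== CLAIM (what is proved, stated in full; the proofs are below) =====
def Claim_equal_emotions_are_equivalent_py : Prop := ∀ (emotion1 : String) (emotion2 : String), Dom_emotions_are_equivalent_py emotion1 emotion2 → Spec_emotions_are_equivalent_py emotion1 emotion2 (emotions_are_equivalent_py emotion1 emotion2)

-- ===== LEMMAS AND PROOFS =====

-- proof-side reference: the groups as plain lists, and the first-group-index scan
def refGroups : List (List String) :=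
  pyEquivalentGroups

def scanIdx : List (List String) → Int → String → Option Int
  | [], _, _ => none
  | g :: gs, i, e => if g.contains e then some i else scanIdx gs (i + 1) e

lemma scanIdx_ge : ∀ (gs : List (List String)) (i k : Int) (e : String),
    scanIdx gs i e = some k → i ≤ k := by
  intro gs
  induction gs with
  | nil => intro i k e h; simp [scanIdx] at h
  | cons g gs ih =>
      intro i k e h
      simp only [scanIdx] at h
      split at h
      · injection h with h; omega
      · have := ih (i + 1) k e h; omega

lemma pyGroupLoop_notin_left (gs : List (List String)) (e1 e2 : String)
    (h : ∀ g ∈ gs, e1 ∉ g) :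
    pyGroupLoop (gs.map PySem.Set.ofList) e1 e2 = (e1 == e2) := by
  induction gs with
  | nil => rfl
  | cons g gs ih =>
      have h1 : e1 ∉ g := h g (by simp)
      simp only [List.map_cons, pyGroupLoop, PySem.Set.contains_eq_listContains]
      rw [if_neg]
      · exact ih (fun g' hg' => h g' (by simp [hg']))
      · simp [PySem.Set.mem_ofList, h1]

lemma pyGroupLoop_notin_right (gs : List (List String)) (e1 e2 : String)
    (h : ∀ g ∈ gs, e2 ∉ g) :
    pyGroupLoop (gs.map PySem.Set.ofList) e1 e2 = (e1 == e2) := by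
  induction gs with
  | nil => rfl
  | cons g gs ih =>
      have h2 : e2 ∉ g := h g (by simp)
      simp only [List.map_cons, pyGroupLoop, PySem.Set.contains_eq_listContains]
      rw [if_neg]
      · exact ih (fun g' hg' => h g' (by simp [hg']))
      · simp [PySem.Set.mem_ofList, h2]

lemma pyGroupLoop_eq_scan : ∀ (gs : List (List String)) (i : Int) (e1 e2 : String),
    List.Pairwise (fun a b => ∀ x ∈ a, x ∉ b) gs →
    pyGroupLoop (gs.map PySem.Set.ofList) e1 e2 =
      (if e1 == e2 then true
       else match scanIdx gs i e1 with
            | none => false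
            | some g1 => scanIdx gs i e2 == some g1) := by
  intro gs
  induction gs with
  | nil =>
      intro i e1 e2 _
      by_cases h : e1 = e2 <;> simp [pyGroupLoop, scanIdx, h]
  | cons g gs ih =>
      intro i e1 e2 hp
      have hdisj : ∀ g' ∈ gs, ∀ x ∈ g, x ∉ g' := by
        intro g' hg' x hx
        exact (List.pairwise_cons.mp hp).1 g' hg' x hx
      have htail := (List.pairwise_cons.mp hp).2
      by_cases hc1 : e1 ∈ g <;> by_cases hc2 : e2 ∈ g
      · simp [pyGroupLoop, scanIdx, hc1, hc2, PySem.Set.contains_eq_listContains,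
              PySem.Set.mem_ofList]
      · have hne : e1 ≠ e2 := fun h => hc2 (h ▸ hc1)
        have hleft : pyGroupLoop ((g :: gs).map PySem.Set.ofList) e1 e2 = false := by
          simp only [List.map_cons, pyGroupLoop, PySem.Set.contains_eq_listContains]
          rw [if_neg (by simp [PySem.Set.mem_ofList, hc2])]
          rw [pyGroupLoop_notin_left gs e1 e2 (fun g' hg' => hdisj g' hg' e1 hc1)]
          simp [hne]
        rw [hleft]
        rw [if_neg (by simp [hne])]
        simp only [scanIdx]
        rw [if_pos (by simp [hc1]), if_neg (by simp [hc2])]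
        cases hscan : scanIdx gs (i + 1) e2 with
        | none => simp
        | some k =>
            have hik := scanIdx_ge gs (i + 1) k e2 hscan
            simp
            omega
      · have hne : e1 ≠ e2 := fun h => hc1 (h ▸ hc2)
        have hleft : pyGroupLoop ((g :: gs).map PySem.Set.ofList) e1 e2 = false := by
          simp only [List.map_cons, pyGroupLoop, PySem.Set.contains_eq_listContains]
          rw [if_neg (by simp [PySem.Set.mem_ofList, hc1])]
          rw [pyGroupLoop_notin_right gs e1 e2 (fun g' hg' => hdisj g' hg' e2 hc2)]
          simp [hne]
        rw [hleft]
        rw [if_neg (by simp [hne])]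
        simp only [scanIdx]
        rw [if_neg (by simp [hc1]), if_pos (by simp [hc2])]
        cases hscan : scanIdx gs (i + 1) e1 with
        | none => simp
        | some k =>
            have hik := scanIdx_ge gs (i + 1) k e1 hscan
            simp
            omega
      · rw [show pyGroupLoop ((g :: gs).map PySem.Set.ofList) e1 e2
               = pyGroupLoop (gs.map PySem.Set.ofList) e1 e2 from by
              simp [pyGroupLoop, PySem.Set.contains_eq_listContains,
                    PySem.Set.mem_ofList, hc1, hc2],
            show scanIdx (g :: gs) i e1 = scanIdx gs (i + 1) e1 from by
              simp [scanIdx, hc1],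
            show scanIdx (g :: gs) i e2 = scanIdx gs (i + 1) e2 from by
              simp [scanIdx, hc2]]
        exact ih (i + 1) e1 e2 htail

set_option maxHeartbeats 2000000 in
lemma pyGroups_eq : pyEquivalentGroups = refGroups.map PySem.Set.ofList := by decide

set_option maxHeartbeats 2000000 in
lemma refGroups_disjoint :
    List.Pairwise (fun a b => ∀ x ∈ a, x ∉ b) refGroups := by decide

-- the hand-written table agrees with building the index from refGroups
set_option maxHeartbeats 2000000 in
set_option maxRecDepth 10000 in
lemma altGroupId_eq_build :
    altGroupId = (PySem.List.enumerate refGroups 0).foldl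
      (fun d p => p.2.foldl (fun d e => d.insert e p.1) d) PySem.Dict.empty := by decide

lemma insertGroup_get? (i : Int) : ∀ (g : List String) (d : PySem.Dict String Int) (e : String),
    (g.foldl (fun d x => d.insert x i) d).get? e = if e ∈ g then some i else d.get? e := by
  intro g
  induction g with
  | nil => intro d e; simp
  | cons x g ih =>
      intro d e
      simp only [List.foldl_cons, ih, PySem.Dict.get?_insert, List.mem_cons]
      by_cases hg : e ∈ g <;> by_cases hx : e = x <;> simp [hg, hx]

lemma scanIdx_none (gs : List (List String)) (i : Int) (e : String)
    (h : ∀ g ∈ gs, e ∉ g) : scanIdx gs i e = none := by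
  induction gs generalizing i with
  | nil => rfl
  | cons g gs ih =>
      simp only [scanIdx]
      rw [if_neg (by simp [h g (by simp)])]
      exact ih (i + 1) (fun g' hg' => h g' (by simp [hg']))

lemma build_get? : ∀ (gs : List (List String)) (i : Int) (d : PySem.Dict String Int) (e : String),
    List.Pairwise (fun a b => ∀ x ∈ a, x ∉ b) gs →
    ((PySem.List.enumerate gs i).foldl
        (fun d p => p.2.foldl (fun d e => d.insert e p.1) d) d).get? e
      = match scanIdx gs i e with
        | some k => some k
        | none => d.get? e := by
  intro gs
  induction gs with
  | nil => intro i d e _; rfl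
  | cons g gs ih =>
      intro i d e hp
      have hdisj : ∀ g' ∈ gs, ∀ x ∈ g, x ∉ g' := fun g' hg' x hx =>
        (List.pairwise_cons.mp hp).1 g' hg' x hx
      have htail := (List.pairwise_cons.mp hp).2
      rw [PySem.List.enumerate_cons, List.foldl_cons]
      rw [ih (i + 1) _ e htail]
      by_cases hc : e ∈ g
      · have hnone : scanIdx gs (i + 1) e = none :=
          scanIdx_none gs (i + 1) e (fun g' hg' => hdisj g' hg' e hc)
        rw [hnone]
        simp only [insertGroup_get? i g d e, if_pos hc]
        simp [scanIdx, hc]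
      · simp only [insertGroup_get? i g d e, if_neg hc]
        rw [show scanIdx (g :: gs) i e = scanIdx gs (i + 1) e from by simp [scanIdx, hc]]

lemma altGroupId_eq_scan (e : String) :
    altGroupId.get? e = scanIdx refGroups 0 e := by
  rw [altGroupId_eq_build, build_get? refGroups 0 PySem.Dict.empty e refGroups_disjoint]
  cases scanIdx refGroups 0 e <;> simp

-- ===== VERDICT (by name: the statement is the Claim_ definition above) =====
theorem emotions_are_equivalent_py_spec : Claim_equal_emotions_are_equivalent_py := by
  intro e1 e2 _
  unfold Spec_emotions_are_equivalent_py
  show pyGroupLoop pyEquivalentGroups e1 e2 = _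
  rw [pyGroups_eq, pyGroupLoop_eq_scan refGroups 0 e1 e2 refGroups_disjoint]
  unfold emotions_are_equivalent_py_alt
  rw [altGroupId_eq_scan, altGroupId_eq_scan]
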